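-- pv_equiv track=rewrite | github.com/sholden3/aiorchestration | governance/rules/smart_rules.py | check_file_patterns
-- ===== SOURCE A (Python) =====
-- from typing import Dict, Any, List, Optional
--
-- def check_file_patterns(files: List[str]) -> Dict[str, List[str]]:
--     """
--     Analyze file patterns for risks
--     """
--     results = {
--         'test_files': [],
--         'config_files': [],
--         'sensitive_files': [],
--         'documentation': [],
--         'governance_files': []
--     }
--
--     for file in files:
--         file_lower = file.lower()
--
--         # Test files
--         if 'test' in file_lower or 'spec' in file_lower:
--             results['test_files'].append(file)
--
--         # Config files
--         if any(ext in file_lower for ext in ['.env', '.config', '.yaml', '.yml', '.json']):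
--             results['config_files'].append(file)
--
--         # Sensitive files
--         if any(sensitive in file_lower for sensitive in ['password', 'secret', 'key', 'token', 'credential']):
--             results['sensitive_files'].append(file)
--
--         # Documentation
--         if any(ext in file_lower for ext in ['.md', '.rst', '.txt', 'readme']):
--             results['documentation'].append(file)
--
--         # Governance files
--         if 'governance' in file_lower:
--             results['governance_files'].append(file)
--
--     return results
-- ===== SOURCE B (Python) =====
-- CATEGORIES = ['test_files', 'config_files', 'sensitive_files', 'documentation', 'governance_files']
--
-- # flat multi-pattern table: (keyword, category) pairs
-- KEYWORD_TABLE = [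
--     ('test', 'test_files'), ('spec', 'test_files'),
--     ('.env', 'config_files'), ('.config', 'config_files'), ('.yaml', 'config_files'),
--     ('.yml', 'config_files'), ('.json', 'config_files'),
--     ('password', 'sensitive_files'), ('secret', 'sensitive_files'), ('key', 'sensitive_files'),
--     ('token', 'sensitive_files'), ('credential', 'sensitive_files'),
--     ('.md', 'documentation'), ('.rst', 'documentation'), ('.txt', 'documentation'),
--     ('readme', 'documentation'),
--     ('governance', 'governance_files'),
-- ]
--
--
-- def _categories_of(name):
--     """One positional multi-pattern scan: at each position of the lowered name,
--     try every keyword of the flat table as a prefix; collect the categories hit."""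
--     s = name.lower()
--     cats = set()
--     for i in range(len(s)):
--         for kw, cat in KEYWORD_TABLE:
--             if s.startswith(kw, i):
--                 cats.add(cat)
--     return cats
--
--
-- def check_file_patterns(files):
--     """Analyze file patterns for risks (tag each file with its category set, then bucket)."""
--     tagged = [(f, _categories_of(f)) for f in files]
--     return {c: [f for f, cats in tagged if c in cats] for c in CATEGORIES}
-- ===== Notes on version B (the rewrite author's own statement) =====
-- stated objective: alternative
-- what changed: Replaced A's five hardcoded per-file substring-membership if/append blocks by a flat (keyword,category) table and a hand-written positional multi-pattern matcher: each file is tagged once with the set of categories whose keyword occurs as a prefix at some position of its lowered name, then the buckets are built from the tagged list.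
import Mathlib
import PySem

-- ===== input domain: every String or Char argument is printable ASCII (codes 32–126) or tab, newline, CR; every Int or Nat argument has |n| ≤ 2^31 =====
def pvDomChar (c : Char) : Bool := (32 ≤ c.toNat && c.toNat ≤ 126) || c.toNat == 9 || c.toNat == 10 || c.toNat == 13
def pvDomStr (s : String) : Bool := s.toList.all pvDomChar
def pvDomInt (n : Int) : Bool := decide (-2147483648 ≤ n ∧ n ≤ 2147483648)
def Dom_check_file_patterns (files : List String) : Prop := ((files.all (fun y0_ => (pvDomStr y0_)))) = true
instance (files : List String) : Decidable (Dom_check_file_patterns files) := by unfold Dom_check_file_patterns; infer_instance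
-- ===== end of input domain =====

-- B replaces A's five hardcoded per-file substring checks by a flat keyword->category table with a
-- positional multi-pattern prefix scan tagging each file with its category set (objective: alternative).

-- ===== PORT A =====
-- one iteration of A's `for file in files` body
def cfpStepA (d : PySem.Dict String (List String)) (file : String) : PySem.Dict String (List String) :=
  let fl := PySem.Str.lower file
  let d := if PySem.Str.isIn "test" fl || PySem.Str.isIn "spec" fl
           then d.modify "test_files" [] (· ++ [file]) else d
  let d := if ([".env", ".config", ".yaml", ".yml", ".json"]).any (fun ext => PySem.Str.isIn ext fl)
           then d.modify "config_files" [] (· ++ [file]) else d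
  let d := if (["password", "secret", "key", "token", "credential"]).any (fun s => PySem.Str.isIn s fl)
           then d.modify "sensitive_files" [] (· ++ [file]) else d
  let d := if ([".md", ".rst", ".txt", "readme"]).any (fun ext => PySem.Str.isIn ext fl)
           then d.modify "documentation" [] (· ++ [file]) else d
  if PySem.Str.isIn "governance" fl then d.modify "governance_files" [] (· ++ [file]) else d

def check_file_patterns (files : List String) : List (String × List String) :=
  let results : PySem.Dict String (List String) :=
    PySem.Dict.ofList [("test_files", []), ("config_files", []), ("sensitive_files", []),
                       ("documentation", []), ("governance_files", [])]
  (files.foldl cfpStepA results).items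

-- ===== PORT B =====
def cfpCATEGORIES : List String :=
  ["test_files", "config_files", "sensitive_files", "documentation", "governance_files"]

def cfpKEYWORD_TABLE : List (String × String) :=
  [("test", "test_files"), ("spec", "test_files"),
   (".env", "config_files"), (".config", "config_files"), (".yaml", "config_files"),
   (".yml", "config_files"), (".json", "config_files"),
   ("password", "sensitive_files"), ("secret", "sensitive_files"), ("key", "sensitive_files"),
   ("token", "sensitive_files"), ("credential", "sensitive_files"),
   (".md", "documentation"), (".rst", "documentation"), (".txt", "documentation"),
   ("readme", "documentation"),
   ("governance", "governance_files")]

-- _categories_of: positional multi-pattern scan over the lowered name.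
-- Python's `s.startswith(kw, i)` with 0 ≤ i < len(s) is exactly `startswith (s.drop i) kw`.
def cfpCategoriesOf (name : String) : PySem.Set String :=
  let s := PySem.Chars.lower name.toList
  (List.range s.length).foldl (fun cats i =>
    cfpKEYWORD_TABLE.foldl (fun cats p =>
      if PySem.Chars.startswith (s.drop i) p.1.toList then PySem.Set.add cats p.2 else cats) cats)
    PySem.Set.empty

def check_file_patterns_alt (files : List String) : List (String × List String) :=
  let tagged := files.map (fun f => (f, cfpCategoriesOf f))
  cfpCATEGORIES.map (fun c =>
    (c, (tagged.filter (fun t => PySem.Set.contains t.2 c)).map Prod.fst))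

-- ===== PRECONDITION & SPEC =====
def Spec_check_file_patterns (files : List String) (out : List (String × List String)) : Prop := out = check_file_patterns_alt files
instance (files : List String) (out : List (String × List String)) : Decidable (Spec_check_file_patterns files out) := by unfold Spec_check_file_patterns; infer_instance

-- ===== CLAIM (what is proved, stated in full; the proofs are below) =====
def Claim_equal_check_file_patterns : Prop := ∀ (files : List String), Dom_check_file_patterns files → Spec_check_file_patterns files (check_file_patterns files)

-- ===== LEMMAS AND PROOFS =====

def cfpKeys : List String :=
  ["test_files", "config_files", "sensitive_files", "documentation", "governance_files"]

-- keywords of a category, read off the flat table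
def cfpKwsOf (c : String) : List String :=
  (cfpKEYWORD_TABLE.filter (fun p => p.2 == c)).map Prod.fst

-- ---- A-side characterization (bucket c = files filtered by "some keyword occurs") ----

lemma cfp_modify_keys (d : PySem.Dict String (List String)) (key : String)
    (g : List String → List String) (h : d.keys = cfpKeys) (hk : key ∈ cfpKeys) :
    (d.modify key [] g).keys = cfpKeys := by
  have hc : d.contains key = true := by
    rw [PySem.Dict.contains_eq_decide_mem_keys, h]; simpa using hk
  rw [PySem.Dict.keys_modify, PySem.Dict.keys_insert_of_contains _ _ hc, h]

lemma cfp_keys_ite (c : Prop) [Decidable c] (d : PySem.Dict String (List String))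
    (key : String) (g : List String → List String) (h : d.keys = cfpKeys) (hk : key ∈ cfpKeys) :
    (if c then d.modify key [] g else d).keys = cfpKeys := by
  split
  · exact cfp_modify_keys d key g h hk
  · exact h

lemma cfp_keys_step (d : PySem.Dict String (List String)) (f : String) (h : d.keys = cfpKeys) :
    (cfpStepA d f).keys = cfpKeys := by
  simp only [cfpStepA]
  exact cfp_keys_ite _ _ _ _
    (cfp_keys_ite _ _ _ _
      (cfp_keys_ite _ _ _ _
        (cfp_keys_ite _ _ _ _
          (cfp_keys_ite _ _ _ _ h (by decide)) (by decide)) (by decide)) (by decide)) (by decide)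

lemma cfp_keys_loop (files : List String) (d : PySem.Dict String (List String))
    (h : d.keys = cfpKeys) : (files.foldl cfpStepA d).keys = cfpKeys := by
  induction files generalizing d with
  | nil => exact h
  | cons f fs ih => exact ih _ (cfp_keys_step d f h)

lemma cfp_getD_skip (c : Prop) [Decidable c] (d : PySem.Dict String (List String))
    (key K : String) (g : List String → List String) (hne : K ≠ key) :
    (if c then d.modify key [] g else d).getD K [] = d.getD K [] := by
  split
  · rw [PySem.Dict.getD_modify, if_neg hne]
  · rfl

lemma cfp_getD_hit (c : Prop) [Decidable c] (d : PySem.Dict String (List String))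
    (K : String) (g : List String → List String) :
    (if c then d.modify K [] g else d).getD K [] = if c then g (d.getD K []) else d.getD K [] := by
  split
  · rw [PySem.Dict.getD_modify, if_pos rfl]
  · rfl

lemma cfp_getD_loop (key : String) (p : String → Bool)
    (hstep : ∀ (d : PySem.Dict String (List String)) (f : String),
      (cfpStepA d f).getD key [] = d.getD key [] ++ if p f then [f] else [])
    (files : List String) (d : PySem.Dict String (List String)) :
    (files.foldl cfpStepA d).getD key [] = d.getD key [] ++ files.filter p := by
  induction files generalizing d with
  | nil => simp
  | cons f fs ih =>
      simp only [List.foldl_cons, ih, hstep, List.filter_cons]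
      split <;> simp

lemma cfp_step_test (d : PySem.Dict String (List String)) (f : String) :
    (cfpStepA d f).getD "test_files" [] = d.getD "test_files" []
      ++ if PySem.Str.isIn "test" (PySem.Str.lower f) || PySem.Str.isIn "spec" (PySem.Str.lower f)
         then [f] else [] := by
  simp only [cfpStepA]
  rw [cfp_getD_skip _ _ _ _ _ (by decide), cfp_getD_skip _ _ _ _ _ (by decide),
      cfp_getD_skip _ _ _ _ _ (by decide), cfp_getD_skip _ _ _ _ _ (by decide), cfp_getD_hit]
  split <;> simp

lemma cfp_step_config (d : PySem.Dict String (List String)) (f : String) :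
    (cfpStepA d f).getD "config_files" [] = d.getD "config_files" []
      ++ if ([".env", ".config", ".yaml", ".yml", ".json"]).any
              (fun ext => PySem.Str.isIn ext (PySem.Str.lower f))
         then [f] else [] := by
  simp only [cfpStepA]
  rw [cfp_getD_skip _ _ _ _ _ (by decide), cfp_getD_skip _ _ _ _ _ (by decide),
      cfp_getD_skip _ _ _ _ _ (by decide), cfp_getD_hit, cfp_getD_skip _ _ _ _ _ (by decide)]
  split <;> simp

lemma cfp_step_sensitive (d : PySem.Dict String (List String)) (f : String) :
    (cfpStepA d f).getD "sensitive_files" [] = d.getD "sensitive_files" []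
      ++ if (["password", "secret", "key", "token", "credential"]).any
              (fun s => PySem.Str.isIn s (PySem.Str.lower f))
         then [f] else [] := by
  simp only [cfpStepA]
  rw [cfp_getD_skip _ _ _ _ _ (by decide), cfp_getD_skip _ _ _ _ _ (by decide),
      cfp_getD_hit, cfp_getD_skip _ _ _ _ _ (by decide), cfp_getD_skip _ _ _ _ _ (by decide)]
  split <;> simp

lemma cfp_step_doc (d : PySem.Dict String (List String)) (f : String) :
    (cfpStepA d f).getD "documentation" [] = d.getD "documentation" []
      ++ if ([".md", ".rst", ".txt", "readme"]).any
              (fun ext => PySem.Str.isIn ext (PySem.Str.lower f))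
         then [f] else [] := by
  simp only [cfpStepA]
  rw [cfp_getD_skip _ _ _ _ _ (by decide), cfp_getD_hit, cfp_getD_skip _ _ _ _ _ (by decide),
      cfp_getD_skip _ _ _ _ _ (by decide), cfp_getD_skip _ _ _ _ _ (by decide)]
  split <;> simp

lemma cfp_step_gov (d : PySem.Dict String (List String)) (f : String) :
    (cfpStepA d f).getD "governance_files" [] = d.getD "governance_files" []
      ++ if PySem.Str.isIn "governance" (PySem.Str.lower f) then [f] else [] := by
  simp only [cfpStepA]
  rw [cfp_getD_hit, cfp_getD_skip _ _ _ _ _ (by decide), cfp_getD_skip _ _ _ _ _ (by decide),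
      cfp_getD_skip _ _ _ _ _ (by decide), cfp_getD_skip _ _ _ _ _ (by decide)]
  split <;> simp

-- ---- B-side characterization ----

-- membership through a foldl of conditional Set.adds
lemma cfp_mem_foldl_iff {β : Type} (x : String) (F : PySem.Set String → β → PySem.Set String)
    (P : β → Prop) (h : ∀ cats b, x ∈ F cats b ↔ x ∈ cats ∨ P b) (l : List β)
    (s0 : PySem.Set String) : x ∈ l.foldl F s0 ↔ x ∈ s0 ∨ ∃ b ∈ l, P b := by
  induction l generalizing s0 with
  | nil => simp
  | cons b bs ih =>
      simp only [List.foldl_cons, ih, h]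
      constructor
      · rintro (( hs | hb) | ⟨b', hb', hp⟩)
        · exact Or.inl hs
        · exact Or.inr ⟨b, by simp, hb⟩
        · exact Or.inr ⟨b', by simp [hb'], hp⟩
      · rintro (hs | ⟨b', hb', hp⟩)
        · exact Or.inl (Or.inl hs)
        · rcases List.mem_cons.mp hb' with rfl | hb'
          · exact Or.inl (Or.inr hp)
          · exact Or.inr ⟨b', hb', hp⟩

lemma cfp_mem_categoriesOf (f : String) (c : String) :
    c ∈ cfpCategoriesOf f ↔
      ∃ i ∈ List.range (PySem.Chars.lower f.toList).length, ∃ p ∈ cfpKEYWORD_TABLE,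
        PySem.Chars.startswith ((PySem.Chars.lower f.toList).drop i) p.1.toList = true ∧ p.2 = c := by
  unfold cfpCategoriesOf
  rw [cfp_mem_foldl_iff c _
      (fun i => ∃ p ∈ cfpKEYWORD_TABLE,
        PySem.Chars.startswith ((PySem.Chars.lower f.toList).drop i) p.1.toList = true ∧ p.2 = c)
      (fun cats i => ?_) _ _]
  · simp [PySem.Set.empty]
  · rw [cfp_mem_foldl_iff c _
        (fun p => PySem.Chars.startswith ((PySem.Chars.lower f.toList).drop i) p.1.toList = true
          ∧ p.2 = c) (fun cats' p => ?_) _ _]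
    split
    · rename_i hsw
      rw [PySem.Set.mem_add]
      constructor
      · rintro (hm | rfl)
        · exact Or.inl hm
        · exact Or.inr ⟨hsw, rfl⟩
      · rintro (hm | ⟨_, rfl⟩)
        · exact Or.inl hm
        · exact Or.inr rfl
    · rename_i hsw
      constructor
      · exact Or.inl
      · rintro (hm | ⟨hsw', _⟩)
        · exact hm
        · exact absurd hsw' hsw

-- a nonempty pattern occurring as a prefix of some suffix is exactly substring occurrence,
-- and the position can be bounded by the length
lemma cfp_exists_pos_iff_isIn (kw s : List Char) (hkw : kw ≠ []) :
    (∃ i ∈ List.range s.length, kw <+: s.drop i) ↔ PySem.Chars.isIn kw s = true := by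
  rw [← PySem.Chars.exists_prefix_drop_iff_isIn]
  constructor
  · rintro ⟨i, _, hp⟩; exact ⟨i, hp⟩
  · rintro ⟨j, hp⟩
    refine ⟨j, List.mem_range.mpr ?_, hp⟩
    by_contra hj
    have : s.drop j = [] := List.drop_eq_nil_of_le (by omega)
    rw [this, List.prefix_nil] at hp
    exact hkw hp

-- the per-file B predicate for category c equals the per-file A predicate
lemma cfp_contains_eq (f c : String) (hc : c ∈ cfpKeys) :
    PySem.Set.contains (cfpCategoriesOf f) c
      = (cfpKwsOf c).any (fun kw => PySem.Str.isIn kw (PySem.Str.lower f)) := by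
  have hiff : c ∈ cfpCategoriesOf f ↔
      ∃ kw ∈ cfpKwsOf c, PySem.Str.isIn kw (PySem.Str.lower f) = true := by
    rw [cfp_mem_categoriesOf]
    constructor
    · rintro ⟨i, hi, p, hp, hsw, rfl⟩
      refine ⟨p.1, List.mem_map_of_mem (List.mem_filter.mpr ⟨hp, by simp⟩), ?_⟩
      have hkw : p.1.toList ≠ [] := by
        fin_cases hp <;> decide
      rw [PySem.Str.isIn_eq, PySem.Str.toList_lower]
      exact (cfp_exists_pos_iff_isIn _ _ hkw).mp
        ⟨i, hi, (PySem.Chars.startswith_iff _ _).mp hsw⟩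
    · rintro ⟨kw, hkw, hin⟩
      obtain ⟨p, hpf, rfl⟩ := List.mem_map.mp hkw
      obtain ⟨hp, hpc⟩ := List.mem_filter.mp hpf
      have hpc : p.2 = c := by simpa using hpc
      have hne : p.1.toList ≠ [] := by fin_cases hp <;> decide
      rw [PySem.Str.isIn_eq, PySem.Str.toList_lower] at hin
      obtain ⟨i, hi, hpre⟩ := (cfp_exists_pos_iff_isIn _ _ hne).mpr hin
      exact ⟨i, hi, p, hp, (PySem.Chars.startswith_iff _ _).mpr hpre, by simpa using hpc⟩
  rcases hb : (cfpKwsOf c).any (fun kw => PySem.Str.isIn kw (PySem.Str.lower f)) with _ | _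
  · simp only [List.any_eq_false] at hb
    have : c ∉ cfpCategoriesOf f := fun hm => by
      obtain ⟨kw, hkw, hin⟩ := hiff.mp hm
      exact absurd hin (by simpa using hb kw hkw)
    simpa [PySem.Set.contains] using this
  · simp only [List.any_eq_true] at hb
    obtain ⟨kw, hkw, hin⟩ := hb
    have : c ∈ cfpCategoriesOf f := hiff.mpr ⟨kw, hkw, by simpa using hin⟩
    simpa [PySem.Set.contains] using this

-- tag-then-project collapses to a plain filter over the files
lemma cfp_tagged_filter (files : List String) (q : PySem.Set String → Bool) :
    ((files.map (fun f => (f, cfpCategoriesOf f))).filter (fun t => q t.2)).map Prod.fst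
      = files.filter (fun f => q (cfpCategoriesOf f)) := by
  induction files with
  | nil => rfl
  | cons f fs ih => by_cases h : q (cfpCategoriesOf f) <;> simp [h, ih]

lemma cfp_alt_bucket (files : List String) (c : String) (hc : c ∈ cfpKeys) :
    ((files.map (fun f => (f, cfpCategoriesOf f))).filter
        (fun t => PySem.Set.contains t.2 c)).map Prod.fst
      = files.filter (fun f => (cfpKwsOf c).any (fun kw => PySem.Str.isIn kw (PySem.Str.lower f))) := by
  rw [cfp_tagged_filter files (fun s => PySem.Set.contains s c)]
  exact List.filter_congr (fun f _ => cfp_contains_eq f c hc)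

-- ===== VERDICT (by name: the statement is the Claim_ definition above) =====
theorem check_file_patterns_spec : Claim_equal_check_file_patterns := by
  intro files _
  show _ = _
  simp only [check_file_patterns]
  have hkeys : (files.foldl cfpStepA
      (PySem.Dict.ofList [("test_files", []), ("config_files", []), ("sensitive_files", []),
                          ("documentation", []), ("governance_files", [])])).keys = cfpKeys :=
    cfp_keys_loop files _ (by decide)
  rw [PySem.Dict.items_eq_map_keys _ (by rw [hkeys]; decide) ([] : List String), hkeys]
  simp only [cfpKeys, List.map_cons, List.map_nil,
    cfp_getD_loop _ _ cfp_step_test files _,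
    cfp_getD_loop _ _ cfp_step_config files _,
    cfp_getD_loop _ _ cfp_step_sensitive files _,
    cfp_getD_loop _ _ cfp_step_doc files _,
    cfp_getD_loop _ _ cfp_step_gov files _,
    show (PySem.Dict.ofList [("test_files", ([] : List String)), ("config_files", []),
        ("sensitive_files", []), ("documentation", []), ("governance_files", [])]).getD "test_files" [] = []
      from by decide,
    show (PySem.Dict.ofList [("test_files", ([] : List String)), ("config_files", []),
        ("sensitive_files", []), ("documentation", []), ("governance_files", [])]).getD "config_files" [] = []
      from by decide,
    show (PySem.Dict.ofList [("test_files", ([] : List String)), ("config_files", []),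
        ("sensitive_files", []), ("documentation", []), ("governance_files", [])]).getD "sensitive_files" [] = []
      from by decide,
    show (PySem.Dict.ofList [("test_files", ([] : List String)), ("config_files", []),
        ("sensitive_files", []), ("documentation", []), ("governance_files", [])]).getD "documentation" [] = []
      from by decide,
    show (PySem.Dict.ofList [("test_files", ([] : List String)), ("config_files", []),
        ("sensitive_files", []), ("documentation", []), ("governance_files", [])]).getD "governance_files" [] = []
      from by decide,
    List.nil_append]
  simp only [check_file_patterns_alt, cfpCATEGORIES, List.map_cons, List.map_nil,
    cfp_alt_bucket files "test_files" (by decide),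
    cfp_alt_bucket files "config_files" (by decide),
    cfp_alt_bucket files "sensitive_files" (by decide),
    cfp_alt_bucket files "documentation" (by decide),
    cfp_alt_bucket files "governance_files" (by decide)]
  simp only [show cfpKwsOf "test_files" = ["test", "spec"] from by decide,
    show cfpKwsOf "config_files" = [".env", ".config", ".yaml", ".yml", ".json"] from by decide,
    show cfpKwsOf "sensitive_files" = ["password", "secret", "key", "token", "credential"] from by decide,
    show cfpKwsOf "documentation" = [".md", ".rst", ".txt", "readme"] from by decide,
    show cfpKwsOf "governance_files" = ["governance"] from by decide,
    List.any_cons, List.any_nil, Bool.or_false]
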